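-- pv_equiv track=rewrite | github.com/dev-yihyun/Algorithm | programmers/Lv0_120843.py | solution
-- ===== SOURCE A (Python) =====
-- def solution(numbers, k):
--     answer = 0
--     j=0
--     for i in range(0,k):
--         if j>len(numbers):
--             j=j-len(numbers)
--         j = j+2
--     answer = numbers[j-2]
--     return answer
-- ===== SOURCE B (Python) =====
-- def solution(numbers, k):
--     return numbers[(2 * k - 2) % len(numbers)]
-- ===== Notes on version B (the rewrite author's own statement) =====
-- stated objective: faster
-- what changed: The per-throw loop that advances an index by 2 with manual wrap-around is replaced by a single closed-form modular index computation numbers[(2*k-2) % len(numbers)].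
-- outside the precondition, e.g. on solution([10, 11, 12], -1): A returns 11, B returns 12
import Mathlib
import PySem

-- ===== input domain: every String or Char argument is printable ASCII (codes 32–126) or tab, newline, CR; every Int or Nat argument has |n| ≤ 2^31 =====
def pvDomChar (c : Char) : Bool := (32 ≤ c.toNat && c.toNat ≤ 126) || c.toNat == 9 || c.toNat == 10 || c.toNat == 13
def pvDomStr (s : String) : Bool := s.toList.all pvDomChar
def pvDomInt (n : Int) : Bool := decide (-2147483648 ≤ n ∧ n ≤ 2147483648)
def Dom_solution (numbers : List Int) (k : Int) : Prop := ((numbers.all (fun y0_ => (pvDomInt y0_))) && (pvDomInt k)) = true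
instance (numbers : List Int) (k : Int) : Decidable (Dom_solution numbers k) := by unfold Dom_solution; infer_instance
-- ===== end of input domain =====

-- B replaces A's O(k) per-throw index loop by the O(1) closed-form modular index (2*k-2) % len(numbers).


-- ===== PORT A =====
-- one loop iteration: 'if j>len(numbers): j=j-len(numbers)' then 'j = j+2'
def pvStepA (N j : Int) : Int := (if j > N then j - N else j) + 2

def solution (numbers : List Int) (k : Int) : Int :=
  let j : Int := (PySem.List.pyRange 0 k 1).foldl (fun j _ => pvStepA (numbers.length : Int) j) 0
  -- numbers[j-2]; pyGet? = none is exactly Python's IndexError, excluded by Pre_solution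
  (PySem.List.pyGet? numbers (j - 2)).getD 0

-- ===== PORT B =====
def solution_alt (numbers : List Int) (k : Int) : Int :=
  -- numbers[(2*k-2) % len(numbers)]; with numbers ≠ [] (Pre_) the Python-mod index is in range
  (PySem.List.pyGet? numbers (PySem.Int.mod (2 * k - 2) (numbers.length : Int))).getD 0

-- ===== PRECONDITION & SPEC =====
-- Pre_ excludes the inputs on which A raises IndexError (empty list; k=0 with a singleton list;
-- k ≥ 2 with len(numbers) dividing 2*(k-1), where A's index lands one past the end), and it excludes
-- negative k — outside the 1-based throw-count domain — where A's empty loop accidentally returns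
-- numbers[-2] and B's modular wrap gives another element: both values are defensible on that
-- unspecified corner, so neither is claimed.
def Pre_solution (numbers : List Int) (k : Int) : Prop :=
  numbers ≠ [] ∧ 0 ≤ k ∧ (k = 0 → 2 ≤ numbers.length) ∧
    (2 ≤ k → PySem.Int.mod (2 * (k - 1)) (numbers.length : Int) ≠ 0)
instance (numbers : List Int) (k : Int) : Decidable (Pre_solution numbers k) := by
  unfold Pre_solution; infer_instance

def pvWitness_solution : List Int × Int := ([10, 20, 30], 3)

def Spec_solution (numbers : List Int) (k : Int) (out : Int) : Prop := out = solution_alt numbers k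
instance (numbers : List Int) (k : Int) (out : Int) : Decidable (Spec_solution numbers k out) := by
  unfold Spec_solution; infer_instance

-- ===== CLAIM (what is proved, stated in full; the proofs are below) =====
def Claim_equal_solution : Prop := ∀ (numbers : List Int) (k : Int), Dom_solution numbers k → Pre_solution numbers k → Spec_solution numbers k (solution numbers k)

-- ===== LEMMAS AND PROOFS =====


-- shift a summand through an emod (used to step the loop's closed form)
theorem pv_emod_shift (a b N : Int) : (a % N + b) % N = (a + b) % N := by
  rw [Int.add_emod (a % N) b, Int.emod_emod_of_dvd a dvd_rfl, ← Int.add_emod]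

-- the fold ignores the list elements: it is iteration of pvStepA, length-many times
theorem pv_foldl_stepA (N : Int) : ∀ (l : List Int) (j : Int),
    l.foldl (fun j _ => pvStepA N j) j = (pvStepA N)^[l.length] j := by
  intro l
  induction l with
  | nil => intro j; rfl
  | cons x xs ih =>
      intro j
      simp only [List.foldl_cons, List.length_cons, Function.iterate_succ_apply, ih]

-- closed form of A's loop state after m ≥ 2 iterations (N = len(numbers) ≥ 2;
-- for N = 1 every k ≥ 2 is excluded by Pre_solution, since N divides everything)
theorem pv_iter_formula (N : Int) (hN : 2 ≤ N) :
    ∀ (m : Nat), 2 ≤ m → (pvStepA N)^[m] 0 = (2 * (m : Int) - 3) % N + 3 := by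
  intro m hm
  induction m, hm using Nat.le_induction with
  | base =>
      have h1 : (1 : Int) % N = 1 := Int.emod_eq_of_lt (by omega) (by omega)
      show pvStepA N (pvStepA N ((pvStepA N)^[0] 0)) = _
      simp only [Function.iterate_zero, id_eq, pvStepA]
      push_cast
      rw [h1]
      split_ifs <;> omega
  | succ m hm ih =>
      have hN0 : N ≠ 0 := by omega
      have hr0 : 0 ≤ (2 * (m : Int) - 3) % N := Int.emod_nonneg _ hN0
      have hrlt : (2 * (m : Int) - 3) % N < N := Int.emod_lt_of_pos _ (by omega)
      rw [Function.iterate_succ_apply', ih]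
      have hcast : (2 * ((m + 1 : Nat) : Int) - 3) = (2 * (m : Int) - 3) + 2 := by
        push_cast; ring
      rw [hcast, ← pv_emod_shift]
      set r := (2 * (m : Int) - 3) % N with hr
      simp only [pvStepA]
      by_cases hgt : r + 3 > N
      · rw [if_pos hgt]
        have h2 : (r + 2) % N = r + 2 - N := by
          have e1 : ((r + 2 - N) + N * 1) % N = (r + 2 - N) % N :=
            Int.add_mul_emod_self_left (r + 2 - N) N 1
          have e2 : (r + 2 - N) % N = r + 2 - N :=
            Int.emod_eq_of_lt (by omega) (by omega)
          calc (r + 2) % N = ((r + 2 - N) + N * 1) % N := by ring_nf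
            _ = r + 2 - N := by rw [e1, e2]
        rw [h2]; ring
      · rw [if_neg hgt, Int.emod_eq_of_lt (by omega) (by omega)]; ring

-- two in-range pyGet? lookups at equal indices agree
theorem pv_pyGet_eq (numbers : List Int) (i i' : Int) (h : i = i') :
    (PySem.List.pyGet? numbers i).getD 0 = (PySem.List.pyGet? numbers i').getD 0 := by rw [h]

-- ===== VERDICT (by name: the statement is the Claim_ definition above) =====
theorem solution_spec : Claim_equal_solution := by
  intro numbers k _hDom hPre
  obtain ⟨hne, hk0, hk0n, hk2⟩ := hPre
  have hN : 1 ≤ (numbers.length : Int) := by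
    have : numbers.length ≠ 0 := by simpa using hne
    omega
  set N : Int := (numbers.length : Int) with hNdef
  have hmodN : PySem.Int.mod (2 * k - 2) N = (2 * k - 2) % N :=
    PySem.Int.mod_eq_emod_of_pos (by omega)
  unfold Spec_solution solution solution_alt
  rw [hmodN]
  rw [pv_foldl_stepA, PySem.List.length_pyRange_one]
  rcases lt_trichotomy k 1 with hk | hk | hk
  · -- k = 0: A reads numbers[-2]; B's index is (-2) % N = N - 2
    have hk0' : k = 0 := by omega
    subst hk0'
    have hn2 : 2 ≤ numbers.length := hk0n rfl
    have hiter : (pvStepA N)^[((0:Int) - 0).toNat] 0 = 0 := by norm_num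
    rw [hiter]
    have hBidx : (2 * (0:Int) - 2) % N = ((numbers.length - 2 : Nat) : Int) := by
      have h1 : (2 * (0:Int) - 2) % N = (N - 2) % N := by
        rw [show (N - 2 : Int) = (2 * 0 - 2) + N * 1 by ring, Int.add_mul_emod_self_left]
      rw [h1, Int.emod_eq_of_lt (by omega) (by omega)]
      omega
    rw [hBidx, PySem.List.pyGet?_natCast]
    show (PySem.List.pyGet? numbers ((0:Int) - 2)).getD 0
      = numbers[numbers.length - 2]?.getD 0
    rw [show (0:Int) - 2 = -2 by ring,
      PySem.List.pyGet?_neg_ofNat numbers 2 (by norm_num) (by omega)]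
  · -- k = 1: one iteration, j = 2, both indices are 0
    subst hk
    have hiter : (pvStepA N)^[((1:Int) - 0).toNat] 0 = 2 := by
      norm_num [pvStepA]
      intro h; omega
    rw [hiter]
    apply pv_pyGet_eq
    norm_num
  · -- k ≥ 2
    have hm2 : 2 ≤ (k - (0:Int)).toNat := by omega
    have hcast : (((k - (0:Int)).toNat : Int)) = k := by omega
    have hnz : (2 * (k - 1)) % N ≠ 0 := by
      have := hk2 (by omega)
      rwa [PySem.Int.mod_eq_emod_of_pos (by omega)] at this
    have hN2 : 2 ≤ N := by
      rcases lt_or_ge N 2 with h | h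
      · exfalso
        have hN1 : N = 1 := by omega
        simp [hN1] at hnz
      · exact h
    rw [pv_iter_formula N hN2 _ hm2, hcast]
    have hr0 : 0 ≤ (2 * k - 2) % N := Int.emod_nonneg _ (by omega)
    have hrlt : (2 * k - 2) % N < N := Int.emod_lt_of_pos _ (by omega)
    have hrpos : 1 ≤ (2 * k - 2) % N := by
      have h22 : 2 * (k - 1) = 2 * k - 2 := by ring
      rw [h22] at hnz
      omega
    apply pv_pyGet_eq
    have hsub : (2 * k - 3) % N = ((2 * k - 2) % N - 1) % N := by
      rw [show ((2 * k - 2) % N - 1 : Int) = (2 * k - 2) % N + (-1) by ring,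
        pv_emod_shift]
      ring_nf
    rw [hsub, Int.emod_eq_of_lt (by omega) (by omega)]
    ring
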